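-- pv_equiv track=rewrite | github.com/vigusmao/TEP_2015_2 | histograma.py | compute_histogram_linear
-- ===== SOURCE A (Python) =====
-- from math import ceil
--
-- GLOBAL_START = 0
--
-- GLOBAL_END = 24 * 3600  # seconds
--
-- def compute_histogram_linear(player_times, columns):
--     step = (GLOBAL_END - GLOBAL_START) // columns
--     histogram = []
--
--     players_by_start_time = {}
--     players_by_end_time = {}
--
--     for times_tuple in player_times:
--         start = times_tuple[0]
--         end = times_tuple[1]
--         if end < GLOBAL_START:
--             continue
--         start = max(start, GLOBAL_START)
--
--         adjusted_start = GLOBAL_START + step * \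
--                          ceil((start - GLOBAL_START) / step)
--         adjusted_end = GLOBAL_START + step * \
--                          ceil((end - GLOBAL_START) / step)
--
--         players_by_start_time[adjusted_start] = \
--                 players_by_start_time.get(adjusted_start, 0) + 1
--         players_by_end_time[adjusted_end] = \
--                 players_by_end_time.get(adjusted_end, 0) + 1
--
--     moment = GLOBAL_START
--     players_online = 0
--     while moment <= GLOBAL_END:
--         players_online += players_by_start_time.get(moment, 0)
--         players_online -= players_by_end_time.get(moment, 0)
--         histogram += [(moment, players_online)]
--         moment += step
--
--     return histogram
-- ===== SOURCE B (Python) =====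
-- GLOBAL_START = 0
--
-- GLOBAL_END = 24 * 3600  # seconds
--
-- def compute_histogram_linear(player_times, columns):
--     step = (GLOBAL_END - GLOBAL_START) // columns
--     # one pass: the same filter/clamp and bucket rounding, kept as a list of
--     # (adjusted_start, adjusted_end) pairs instead of two delta dicts
--     spans = []
--     for start, end in player_times:
--         if end < GLOBAL_START:
--             continue
--         start = max(start, GLOBAL_START)
--         a = GLOBAL_START + step * -((GLOBAL_START - start) // step)
--         e = GLOBAL_START + step * -((GLOBAL_START - end) // step)
--         spans.append((a, e))
--     # per grid moment, count interval membership directly (signed, so that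
--     # reversed intervals contribute exactly as the running sweep does)
--     histogram = []
--     moment = GLOBAL_START
--     while moment <= GLOBAL_END:
--         online = sum((a <= moment) - (e <= moment) for a, e in spans)
--         histogram.append((moment, online))
--         moment += step
--     return histogram
-- ===== Notes on version B (the rewrite author's own statement) =====
-- stated objective: alternative
-- what changed: Replaces the two delta dicts plus running-accumulator sweep with one pass building the adjusted-interval list and a direct signed per-moment membership count over it.
import Mathlib
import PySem

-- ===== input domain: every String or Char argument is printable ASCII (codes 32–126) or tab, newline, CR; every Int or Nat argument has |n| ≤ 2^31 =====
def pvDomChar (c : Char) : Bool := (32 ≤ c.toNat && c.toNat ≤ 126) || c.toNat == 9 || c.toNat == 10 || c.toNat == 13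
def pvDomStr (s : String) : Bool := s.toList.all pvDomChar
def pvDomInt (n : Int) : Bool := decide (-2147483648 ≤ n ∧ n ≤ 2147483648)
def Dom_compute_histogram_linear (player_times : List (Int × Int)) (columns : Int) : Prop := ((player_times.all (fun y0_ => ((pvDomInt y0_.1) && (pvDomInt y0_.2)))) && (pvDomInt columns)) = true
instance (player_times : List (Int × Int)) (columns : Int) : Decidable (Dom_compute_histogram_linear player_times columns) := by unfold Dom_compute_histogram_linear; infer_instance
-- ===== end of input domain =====

-- B replaces A's two delta dicts + running accumulator by an interval list and a direct
-- signed per-moment membership count (alternative decomposition, not claimed faster).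

-- ===== PORT A =====
-- A's while loop, ported with fuel: under Pre_ (step ≥ 1) the loop runs at most 86401
-- iterations, so fuel 86402 is never exhausted on admitted inputs.
def pvALoop (sd ed : PySem.Dict Int Int) (step : Int) : Nat → Int → Int → List (Int × Int)
  | 0, _, _ => []
  | n+1, moment, online =>
    if moment ≤ 86400 then
      (moment, online + sd.getD moment 0 - ed.getD moment 0) ::
        pvALoop sd ed step n (moment + step) (online + sd.getD moment 0 - ed.getD moment 0)
    else []

-- ceil((x - GLOBAL_START)/step) is ported as -((-(x - 0)) // step): exact for Python's float
-- ceil on Dom (|values| ≤ 2^31 ≪ 2^53 and 1 ≤ step ≤ 86400 under Pre_, so the float quotient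
-- is within 2^-22 of the exact rational, closer than the 1/86400 gap to the nearest integer).
def compute_histogram_linear (player_times : List (Int × Int)) (columns : Int) : List (Int × Int) :=
  let step := PySem.Int.floordiv (86400 - 0) columns
  let ds := player_times.foldl
    (fun (ds : PySem.Dict Int Int × PySem.Dict Int Int) tt =>
      if tt.2 < 0 then ds
      else
        let start := max tt.1 0
        let a := 0 + step * (-(PySem.Int.floordiv (-(start - 0)) step))
        let e := 0 + step * (-(PySem.Int.floordiv (-(tt.2 - 0)) step))
        (ds.1.insert a (ds.1.getD a 0 + 1), ds.2.insert e (ds.2.getD e 0 + 1)))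
    (PySem.Dict.empty, PySem.Dict.empty)
  pvALoop ds.1 ds.2 step 86402 0 0

-- ===== PORT B =====
def pvBCount (spans : List (Int × Int)) (moment : Int) : Int :=
  spans.foldl (fun acc s =>
    acc + (if s.1 ≤ moment then 1 else 0) - (if s.2 ≤ moment then 1 else 0)) 0

def pvBLoop (spans : List (Int × Int)) (step : Int) : Nat → Int → List (Int × Int)
  | 0, _ => []
  | n+1, moment =>
    if moment ≤ 86400 then
      (moment, pvBCount spans moment) :: pvBLoop spans step n (moment + step)
    else []

def compute_histogram_linear_alt (player_times : List (Int × Int)) (columns : Int) : List (Int × Int) :=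
  let step := PySem.Int.floordiv (86400 - 0) columns
  let spans := player_times.foldl
    (fun (acc : List (Int × Int)) tt =>
      if tt.2 < 0 then acc
      else
        let start := max tt.1 0
        acc ++ [(0 + step * (-(PySem.Int.floordiv (0 - start) step)),
                 0 + step * (-(PySem.Int.floordiv (0 - tt.2) step)))])
    []
  pvBLoop spans step 86402 0

-- ===== PRECONDITION & SPEC =====
-- Pre_: exactly the inputs on which A returns: columns ≤ 0 or columns > 86400 gives step ≤ 0,
-- where A raises ZeroDivisionError (columns = 0, or step = 0 with an unskipped player) or its
-- while loop never terminates (moment never exceeds GLOBAL_END).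
def Pre_compute_histogram_linear (player_times : List (Int × Int)) (columns : Int) : Prop :=
  0 < columns ∧ columns ≤ 86400
instance (player_times : List (Int × Int)) (columns : Int) : Decidable (Pre_compute_histogram_linear player_times columns) := by unfold Pre_compute_histogram_linear; infer_instance
def pvWitness_compute_histogram_linear : (List (Int × Int)) × Int := ([(0, 3600), (7200, 50000)], 24)
def Spec_compute_histogram_linear (player_times : List (Int × Int)) (columns : Int) (out : List (Int × Int)) : Prop := out = compute_histogram_linear_alt player_times columns
instance (player_times : List (Int × Int)) (columns : Int) (out : List (Int × Int)) : Decidable (Spec_compute_histogram_linear player_times columns out) := by unfold Spec_compute_histogram_linear; infer_instance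

-- ===== CLAIM (what is proved, stated in full; the proofs are below) =====
def Claim_equal_compute_histogram_linear : Prop := ∀ (player_times : List (Int × Int)) (columns : Int), Dom_compute_histogram_linear player_times columns → Pre_compute_histogram_linear player_times columns → Spec_compute_histogram_linear player_times columns (compute_histogram_linear player_times columns)

-- ===== LEMMAS AND PROOFS =====

-- the shared filter/clamp/bucket step, as a filterMap
def pvF (step : Int) (tt : Int × Int) : Option (Int × Int) :=
  if tt.2 < 0 then none
  else some (0 + step * (-(PySem.Int.floordiv (0 - max tt.1 0) step)),
             0 + step * (-(PySem.Int.floordiv (0 - tt.2) step)))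

-- B's span-building fold is filterMap pvF
theorem pvSpans_eq (step : Int) : ∀ (pt : List (Int × Int)) (acc : List (Int × Int)),
    pt.foldl
      (fun (acc : List (Int × Int)) tt =>
        if tt.2 < 0 then acc
        else
          let start := max tt.1 0
          acc ++ [(0 + step * (-(PySem.Int.floordiv (0 - start) step)),
                   0 + step * (-(PySem.Int.floordiv (0 - tt.2) step)))])
      acc = acc ++ pt.filterMap (pvF step) := by
  intro pt
  induction pt with
  | nil => intro acc; simp
  | cons h t ih =>
    intro acc
    by_cases hc : h.2 < 0
    · rw [List.filterMap_cons_none (by simp [pvF, hc])]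
      simp only [List.foldl_cons, if_pos hc]
      exact ih acc
    · rw [List.filterMap_cons_some
        (show pvF step h = some (0 + step * (-(PySem.Int.floordiv (0 - max h.1 0) step)),
            0 + step * (-(PySem.Int.floordiv (0 - h.2) step))) from by simp [pvF, hc])]
      simp only [List.foldl_cons, if_neg hc]
      rw [ih]
      simp only [List.append_assoc, List.singleton_append]

theorem pvCounterSnoc (xs : List Int) (x : Int) :
    (PySem.Dict.counter xs).insert x ((PySem.Dict.counter xs).getD x 0 + 1)
      = PySem.Dict.counter (xs ++ [x]) := by
  rw [← PySem.Dict.foldl_insert_getD_add_one_eq_counter xs,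
      ← PySem.Dict.foldl_insert_getD_add_one_eq_counter (xs ++ [x]),
      List.foldl_append]
  rfl

-- A's dict-building fold produces the counters of the two coordinate lists of the spans
theorem pvDicts_eq (step : Int) : ∀ (pt : List (Int × Int)) (l1 l2 : List Int),
    pt.foldl
      (fun (ds : PySem.Dict Int Int × PySem.Dict Int Int) tt =>
        if tt.2 < 0 then ds
        else
          let start := max tt.1 0
          let a := 0 + step * (-(PySem.Int.floordiv (-(start - 0)) step))
          let e := 0 + step * (-(PySem.Int.floordiv (-(tt.2 - 0)) step))
          (ds.1.insert a (ds.1.getD a 0 + 1), ds.2.insert e (ds.2.getD e 0 + 1)))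
      (PySem.Dict.counter l1, PySem.Dict.counter l2)
      = (PySem.Dict.counter (l1 ++ (pt.filterMap (pvF step)).map (·.1)),
         PySem.Dict.counter (l2 ++ (pt.filterMap (pvF step)).map (·.2))) := by
  intro pt
  induction pt with
  | nil => intro l1 l2; simp
  | cons h t ih =>
    intro l1 l2
    by_cases hc : h.2 < 0
    · rw [List.filterMap_cons_none (by simp [pvF, hc])]
      simp only [List.foldl_cons, if_pos hc]
      exact ih l1 l2
    · rw [List.filterMap_cons_some
        (show pvF step h = some (0 + step * (-(PySem.Int.floordiv (-(max h.1 0 - 0)) step)),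
            0 + step * (-(PySem.Int.floordiv (-(h.2 - 0)) step))) from by
          simp [pvF, hc])]
      simp only [List.foldl_cons, if_neg hc]
      rw [pvCounterSnoc, pvCounterSnoc, ih]
      simp only [List.map_cons, List.append_assoc, List.singleton_append]

-- pointwise bucket fact: on a step-grid, "entered by m but not by m - step" means "entered at m"
theorem pvStepPoint (step c m j k : Int) (hs : 1 ≤ step) (hc : c = step * j) (hm : m = step * k) :
    ((if c ≤ m then (1 : Int) else 0) - (if c ≤ m - step then 1 else 0))
      = (if c = m then 1 else 0) := by
  subst hc hm
  have hpos : (0 : Int) < step := by omega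
  have e1 : (step * j ≤ step * k) ↔ j ≤ k := by
    constructor
    · intro h; exact le_of_mul_le_mul_left h hpos
    · intro h; exact mul_le_mul_of_nonneg_left h (le_of_lt hpos)
  have e2 : (step * j ≤ step * k - step) ↔ j ≤ k - 1 := by
    rw [show step * k - step = step * (k - 1) by ring]
    constructor
    · intro h; exact le_of_mul_le_mul_left h hpos
    · intro h; exact mul_le_mul_of_nonneg_left h (le_of_lt hpos)
  have e3 : (step * j = step * k) ↔ j = k := by
    constructor
    · intro h; exact mul_left_cancel₀ (by omega) h
    · intro h; rw [h]
  simp only [e1, e2, e3]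
  split_ifs <;> omega

-- pvBCount as a difference of countP's
theorem pvBCount_eq (spans : List (Int × Int)) (m : Int) :
    pvBCount spans m
      = ((spans.map (·.1)).countP (· ≤ m) : Int) - ((spans.map (·.2)).countP (· ≤ m) : Int) := by
  unfold pvBCount
  induction spans using List.reverseRecOn with
  | nil => simp
  | append_singleton t h ih =>
    simp only [List.foldl_append, List.foldl_cons, List.foldl_nil, ih, List.map_append,
      List.countP_append]
    by_cases h1 : h.1 ≤ m <;> by_cases h2 : h.2 ≤ m <;>
      simp [h1, h2] <;> ring

-- count splitting along the grid
theorem pvCountP_split (step m k : Int) (hs : 1 ≤ step) (hm : m = step * k) :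
    ∀ (l : List Int), (∀ c ∈ l, ∃ j, 0 ≤ j ∧ c = step * j) →
      (l.countP (· ≤ m) : Int) = (l.countP (· ≤ m - step) : Int) + (l.count m : Int) := by
  intro l
  induction l with
  | nil => simp
  | cons c t ih =>
    intro hall
    obtain ⟨j, hj0, hj⟩ := hall c (by simp)
    have ht := ih (fun x hx => hall x (by simp [hx]))
    have hp := pvStepPoint step c m j k hs hj hm
    simp only [List.countP_cons, List.count_cons]
    by_cases a1 : c ≤ m <;> by_cases a2 : c ≤ m - step <;> by_cases a3 : c = m <;>
      simp [a1, a2, a3] at hp ⊢ <;> omega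

theorem pvBCount_neg (spans : List (Int × Int)) (m : Int) (hm : m < 0)
    (hall : ∀ s ∈ spans, 0 ≤ s.1 ∧ 0 ≤ s.2) :
    pvBCount spans m = 0 := by
  rw [pvBCount_eq]
  have h1 : (spans.map (·.1)).countP (· ≤ m) = 0 := by
    rw [List.countP_eq_zero]
    intro x hx
    obtain ⟨s, hs, rfl⟩ := List.mem_map.mp hx
    have := (hall s hs).1
    simp only [decide_eq_true_eq]
    omega
  have h2 : (spans.map (·.2)).countP (· ≤ m) = 0 := by
    rw [List.countP_eq_zero]
    intro x hx
    obtain ⟨s, hs, rfl⟩ := List.mem_map.mp hx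
    have := (hall s hs).2
    simp only [decide_eq_true_eq]
    omega
  rw [h1, h2]
  simp

-- every span coordinate is a nonnegative multiple of step
theorem pvF_mem (step : Int) (hs : 1 ≤ step) (pt : List (Int × Int)) (s : Int × Int)
    (hmem : s ∈ pt.filterMap (pvF step)) :
    (∃ j, 0 ≤ j ∧ s.1 = step * j) ∧ (∃ j, 0 ≤ j ∧ s.2 = step * j) := by
  obtain ⟨tt, _, hf⟩ := List.mem_filterMap.mp hmem
  unfold pvF at hf
  by_cases hc : tt.2 < 0
  · simp [hc] at hf
  · simp only [hc, if_false] at hf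
    obtain rfl := (Option.some_inj.mp hf).symm
    have hpos : (0 : Int) < step := by omega
    have hq1 : PySem.Int.floordiv (0 - max tt.1 0) step < 1 :=
      (PySem.Int.floordiv_lt_iff_lt_mul hpos).mpr (by have := le_max_right tt.1 (0:Int); omega)
    have hq2 : PySem.Int.floordiv (0 - tt.2) step < 1 :=
      (PySem.Int.floordiv_lt_iff_lt_mul hpos).mpr (by omega)
    constructor
    · exact ⟨-(PySem.Int.floordiv (0 - max tt.1 0) step), by omega, by ring⟩
    · exact ⟨-(PySem.Int.floordiv (0 - tt.2) step), by omega, by ring⟩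

-- main loop equality
theorem pvLoop_eq (spans : List (Int × Int)) (step : Int) (hs : 1 ≤ step)
    (hall : ∀ s ∈ spans, (∃ j, 0 ≤ j ∧ s.1 = step * j) ∧ (∃ j, 0 ≤ j ∧ s.2 = step * j)) :
    ∀ (n : Nat) (moment online k : Int), moment = step * k → 0 ≤ k →
      online = pvBCount spans (moment - step) →
      pvALoop (PySem.Dict.counter (spans.map (·.1))) (PySem.Dict.counter (spans.map (·.2)))
        step n moment online = pvBLoop spans step n moment := by
  intro n
  induction n with
  | zero => intro _ _ _ _ _ _; rfl
  | succ n ih =>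
    intro moment online k hk hk0 honline
    simp only [pvALoop, pvBLoop]
    by_cases hm : moment ≤ 86400
    · simp only [if_pos hm]
      have hstep : online + (PySem.Dict.counter (spans.map (·.1))).getD moment 0
          - (PySem.Dict.counter (spans.map (·.2))).getD moment 0 = pvBCount spans moment := by
        rw [honline, PySem.Dict.getD_counter, PySem.Dict.getD_counter,
          pvBCount_eq, pvBCount_eq,
          pvCountP_split step moment k hs hk (spans.map (·.1))
            (by intro c hc; obtain ⟨s, hs', rfl⟩ := List.mem_map.mp hc; exact (hall s hs').1),
          pvCountP_split step moment k hs hk (spans.map (·.2))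
            (by intro c hc; obtain ⟨s, hs', rfl⟩ := List.mem_map.mp hc; exact (hall s hs').2)]
        ring
      rw [hstep, ih (moment + step) (pvBCount spans moment) (k + 1) (by rw [hk]; ring)
        (by omega) (by congr 1; ring)]
    · simp [if_neg hm]

-- ===== VERDICT (by name: the statement is the Claim_ definition above) =====
theorem compute_histogram_linear_spec : Claim_equal_compute_histogram_linear := by
  intro pt cols _ hpre
  obtain ⟨h0, h1⟩ := hpre
  unfold Spec_compute_histogram_linear compute_histogram_linear compute_histogram_linear_alt
  simp only []
  have hs : 1 ≤ PySem.Int.floordiv (86400 - 0) cols := by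
    have := (PySem.Int.le_floordiv_iff_mul_le (a := 86400 - 0) (b := cols) (q := 1) h0).mpr
      (by omega)
    omega
  rw [show ((PySem.Dict.empty : PySem.Dict Int Int), (PySem.Dict.empty : PySem.Dict Int Int))
      = (PySem.Dict.counter ([] : List Int), PySem.Dict.counter ([] : List Int)) from rfl,
    pvDicts_eq, pvSpans_eq]
  simp only [List.nil_append]
  exact pvLoop_eq _ _ hs (fun s hmem => pvF_mem _ hs pt s hmem) 86402 0 0 0 (by ring)
    le_rfl (by rw [pvBCount_neg _ _ (by omega)
      (fun s hmem => ⟨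
        by obtain ⟨⟨j, hj0, hj⟩, _⟩ := pvF_mem _ hs pt s hmem; rw [hj]; positivity,
        by obtain ⟨_, ⟨j, hj0, hj⟩⟩ := pvF_mem _ hs pt s hmem; rw [hj]; positivity⟩)])
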